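-- pv_equiv track=rewrite | github.com/vutrongvtv24-cloud/alltext-to-md.html | app.py | _clean_pdf_text
-- ===== SOURCE A (Python) =====
-- def _clean_pdf_text(text: str) -> str:
--     """Clean extracted PDF text."""
--     if not text:
--         return ""
--
--     # Remove excessive whitespace while preserving paragraph breaks
--     lines = text.split('\n')
--     cleaned_lines = []
--
--     for line in lines:
--         stripped = line.strip()
--         if stripped:
--             cleaned_lines.append(stripped)
--         elif cleaned_lines and cleaned_lines[-1] != "":
--             cleaned_lines.append("")  # Preserve paragraph breaks
--
--     return "\n".join(cleaned_lines)
-- ===== SOURCE B (Python) =====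
-- def _clean_pdf_text(text: str) -> str:
--     """Clean extracted PDF text."""
--     if not text:
--         return ""
--
--     # Strip all lines first, then walk over maximal runs of blank/non-blank
--     # lines: a non-blank run is copied whole, a blank run contributes a
--     # single "" unless nothing has been emitted yet.
--     lines = [l.strip() for l in text.split('\n')]
--     out = []
--     i = 0
--     n = len(lines)
--     while i < n:
--         blank = (lines[i] == "")
--         j = i
--         while j < n and (lines[j] == "") == blank:
--             j += 1
--         if blank:
--             if out:
--                 out.append("")
--         else:
--             out.extend(lines[i:j])
--         i = j
--     return "\n".join(out)
-- ===== Notes on version B (the rewrite author's own statement) =====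
-- stated objective: alternative
-- what changed: Replaces A's stateful single pass (checking cleaned_lines[-1] at every blank line) with a pre-stripped line list scanned as maximal blank/non-blank runs: a non-blank run is copied whole, a blank run emits one '' if output is non-empty.
import Mathlib
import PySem

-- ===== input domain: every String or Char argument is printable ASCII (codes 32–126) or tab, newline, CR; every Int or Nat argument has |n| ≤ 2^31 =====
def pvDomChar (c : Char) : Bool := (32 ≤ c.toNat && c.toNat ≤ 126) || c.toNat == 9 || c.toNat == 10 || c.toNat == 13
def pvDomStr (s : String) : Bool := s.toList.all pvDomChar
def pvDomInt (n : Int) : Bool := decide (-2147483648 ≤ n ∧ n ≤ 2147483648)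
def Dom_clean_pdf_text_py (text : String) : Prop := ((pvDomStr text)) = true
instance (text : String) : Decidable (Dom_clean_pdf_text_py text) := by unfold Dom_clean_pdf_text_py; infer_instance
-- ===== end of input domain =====

-- B replaces A's stateful single pass (peeking at cleaned_lines[-1]) by a scan over
-- maximal blank/non-blank runs of the pre-stripped lines; same cost, alternative structure.

-- ===== PORT A =====
-- the body of A's for-loop: strip, append non-blank, or one "" after non-blank output
def pvAStep (acc : List String) (line : String) : List String :=
  let stripped := PySem.Str.strip line
  if stripped ≠ "" then acc ++ [stripped]
  else if acc ≠ [] ∧ acc.getLast? ≠ some "" then acc ++ [""] else acc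

def clean_pdf_text_py (text : String) : String :=
  if text = "" then ""
  else
    let lines := (PySem.Str.split? text "\n").getD []
    let cleaned_lines := lines.foldl pvAStep []
    PySem.Str.join "\n" cleaned_lines

-- ===== PORT B =====
-- Source B's outer while loop: consume one maximal run of equal blankness per step
def pvBGo (acc : List String) : List String → List String
  | [] => acc
  | s :: rest =>
    let b := (s == "")
    let run := s :: rest.takeWhile (fun t => (t == "") == b)
    let rem := rest.dropWhile (fun t => (t == "") == b)
    pvBGo (if b then (if acc = [] then acc else acc ++ [""]) else acc ++ run) rem
termination_by l => l.length
decreasing_by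
  simpa using Nat.lt_succ_of_le (List.length_dropWhile_le _ _)

def clean_pdf_text_py_alt (text : String) : String :=
  if text = "" then ""
  else
    let lines := ((PySem.Str.split? text "\n").getD []).map PySem.Str.strip
    PySem.Str.join "\n" (pvBGo [] lines)

-- ===== PRECONDITION & SPEC =====
def Spec_clean_pdf_text_py (text : String) (out : String) : Prop := out = clean_pdf_text_py_alt text
instance (text : String) (out : String) : Decidable (Spec_clean_pdf_text_py text out) := by unfold Spec_clean_pdf_text_py; infer_instance

-- ===== CLAIM (what is proved, stated in full; the proofs are below) =====
def Claim_equal_clean_pdf_text_py : Prop := ∀ (text : String), Dom_clean_pdf_text_py text → Spec_clean_pdf_text_py text (clean_pdf_text_py text)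

-- ===== LEMMAS AND PROOFS =====

-- A's step on an already-stripped line
def pvStep (acc : List String) (s : String) : List String :=
  if s ≠ "" then acc ++ [s]
  else if acc ≠ [] ∧ acc.getLast? ≠ some "" then acc ++ [""] else acc

theorem pv_foldA_map (lines : List String) (acc : List String) :
    lines.foldl pvAStep acc = (lines.map PySem.Str.strip).foldl pvStep acc := by
  rw [List.foldl_map]; rfl

theorem pv_blanks_fixed (bs : List String) (acc : List String)
    (hb : ∀ x ∈ bs, x = "") (h : acc = [] ∨ acc.getLast? = some "") :
    bs.foldl pvStep acc = acc := by
  induction bs with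
  | nil => rfl
  | cons x xs ih =>
    have hx : x = "" := hb x (by simp)
    have hstep : pvStep acc x = acc := by
      subst hx
      unfold pvStep
      rcases h with h | h <;> simp [h]
    simp only [List.foldl_cons, hstep]
    exact ih (fun y hy => hb y (by simp [hy]))

theorem pv_nonblanks_append (bs : List String) (acc : List String)
    (hb : ∀ x ∈ bs, x ≠ "") :
    bs.foldl pvStep acc = acc ++ bs := by
  induction bs generalizing acc with
  | nil => simp
  | cons x xs ih =>
    have hx : x ≠ "" := hb x (by simp)
    have hstep : pvStep acc x = acc ++ [x] := by unfold pvStep; simp [hx]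
    simp only [List.foldl_cons, hstep]
    rw [ih _ (fun y hy => hb y (by simp [hy]))]
    simp

theorem pv_dropWhile_head_not {α : Type} (p : α → Bool) :
    ∀ (l : List α) (x : α) (xs : List α), l.dropWhile p = x :: xs → p x = false := by
  intro l
  induction l with
  | nil => intro x xs h; simp [List.dropWhile] at h
  | cons a as ih =>
    intro x xs h
    by_cases hp : p a
    · rw [List.dropWhile_cons_of_pos hp] at h
      exact ih x xs h
    · rw [List.dropWhile_cons_of_neg hp] at h
      cases h
      simpa using hp

theorem pvBGo_blank (acc : List String) (rest : List String) :
    pvBGo acc ("" :: rest) =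
      pvBGo (if acc = [] then acc else acc ++ [""])
            (rest.dropWhile (fun t => t == "")) := by
  rw [pvBGo]
  simp

theorem pvBGo_nonblank (acc : List String) (s : String) (rest : List String) (hs : s ≠ "") :
    pvBGo acc (s :: rest) =
      pvBGo (acc ++ s :: rest.takeWhile (fun t => (t == "") == false))
            (rest.dropWhile (fun t => (t == "") == false)) := by
  rw [pvBGo]
  have hb : (s == "") = false := by simpa using hs
  simp [hb]

theorem pv_main : ∀ (n : Nat) (L : List String) (acc : List String), L.length ≤ n →
    ((acc = [] ∨ acc.getLast? ≠ some "") ∨ L = [] ∨ (∃ s t, L = s :: t ∧ s ≠ "")) →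
    L.foldl pvStep acc = pvBGo acc L := by
  intro n
  induction n with
  | zero =>
    intro L acc hlen _
    have : L = [] := List.length_eq_zero_iff.mp (Nat.le_zero.mp hlen)
    subst this
    rw [pvBGo]
    rfl
  | succ n ih =>
    intro L acc hlen H
    match L with
    | [] => rw [pvBGo]; rfl
    | s :: rest =>
      by_cases hs : s = ""
      · -- blank run
        subst hs
        have hInv : acc = [] ∨ acc.getLast? ≠ some "" := by
          rcases H with h | h | ⟨s', t', heq, hne⟩
          · exact h
          · exact absurd h (by simp)
          · cases heq; exact absurd rfl hne
        rw [pvBGo_blank]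
        set run := List.takeWhile (fun t : String => t == "") rest with hrun
        set rem := List.dropWhile (fun t : String => t == "") rest with hrem
        have hsplit : rest = run ++ rem := (List.takeWhile_append_dropWhile ..).symm
        set acc' := (if acc = [] then acc else acc ++ [""]) with hacc'
        have hstep : pvStep acc "" = acc' := by
          unfold pvStep
          rcases hInv with h | h <;> simp [h, hacc']
        have hrunblank : ∀ x ∈ run, x = "" := by
          intro x hx
          have hpx : ((x == "") = true) :=
            List.mem_takeWhile_imp (p := fun t : String => t == "") (hrun ▸ hx)
          simpa using hpx
        have hacc'inv : acc' = [] ∨ acc'.getLast? = some "" := by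
          rw [hacc']
          by_cases h0 : acc = []
          · left; simp [h0]
          · right; simp [h0]
        have hfold : (("" :: rest).foldl pvStep acc) = rem.foldl pvStep acc' := by
          rw [List.foldl_cons, hstep, hsplit, List.foldl_append,
            pv_blanks_fixed run acc' hrunblank hacc'inv]
        rw [hfold]
        apply ih rem acc'
        · have : rem.length ≤ rest.length := hrem ▸ List.length_dropWhile_le _ _
          simp at hlen; omega
        · right
          match hr : rem with
          | [] => left; rfl
          | r :: rs =>
            right
            refine ⟨r, rs, rfl, ?_⟩
            have hfalse := pv_dropWhile_head_not (fun t : String => t == "") rest r rs hrem.symm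
            simpa using hfalse
      · -- non-blank run
        rw [pvBGo_nonblank acc s rest hs]
        set run := List.takeWhile (fun t : String => (t == "") == false) rest with hrun
        set rem := List.dropWhile (fun t : String => (t == "") == false) rest with hrem
        have hsplit : rest = run ++ rem := (List.takeWhile_append_dropWhile ..).symm
        have hrunnb : ∀ x ∈ (s :: run), x ≠ "" := by
          intro x hx
          rcases List.mem_cons.mp hx with h | h
          · subst h; exact hs
          · have hpx : (((x == "") == false) = true) :=
              List.mem_takeWhile_imp (p := fun t : String => (t == "") == false) (hrun ▸ h)
            simpa using hpx
        have hfold : ((s :: rest).foldl pvStep acc) = rem.foldl pvStep (acc ++ (s :: run)) := by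
          have heq : (s :: rest) = (s :: run) ++ rem := by rw [hsplit]; rfl
          rw [heq, List.foldl_append, pv_nonblanks_append _ _ hrunnb]
        rw [hfold]
        apply ih rem (acc ++ (s :: run))
        · have : rem.length ≤ rest.length := hrem ▸ List.length_dropWhile_le _ _
          simp at hlen; omega
        · left; right
          rw [List.getLast?_append_cons]
          have hne : (s :: run) ≠ [] := by simp
          rw [List.getLast?_eq_some_getLast hne]
          intro hcon
          have hlast : (s :: run).getLast hne = "" := by injection hcon
          exact hrunnb _ (List.getLast_mem hne) hlast

-- ===== VERDICT (by name: the statement is the Claim_ definition above) =====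
theorem clean_pdf_text_py_spec : Claim_equal_clean_pdf_text_py := by
  intro text _
  unfold Spec_clean_pdf_text_py clean_pdf_text_py clean_pdf_text_py_alt
  by_cases h : text = ""
  · simp [h]
  · simp only [h, ite_false]
    congr 1
    rw [pv_foldA_map]
    exact pv_main _ _ [] le_rfl (Or.inl (Or.inl rfl))
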